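-- pv_equiv track=rewrite | github.com/LilyKun064/LLM_Gender_Bias | code/analysis_pt1.py | detect_pronoun
-- ===== SOURCE A (Python) =====
-- def detect_pronoun(text: str) -> str:
--     """
--     Crude heuristic to classify the dominant third-person pronoun
--     in a short description (here: response_pronoun).
--
--     Returns: "he", "she", "they", "mixed", or "unknown".
--     """
--     if not isinstance(text, str):
--         return "unknown"
--
--     t = " " + text.lower().strip() + " "
--
--     he_hits = any(tok in t for tok in [" he ", " him ", " his "])
--     she_hits = any(tok in t for tok in [" she ", " her ", " hers "])
--     they_hits = any(tok in t for tok in [" they ", " them ", " their ", " theirs "])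
--
--     if he_hits and not she_hits and not they_hits:
--         return "he"
--     if she_hits and not he_hits and not they_hits:
--         return "she"
--     if they_hits and not he_hits and not she_hits:
--         return "they"
--     if sum([he_hits, she_hits, they_hits]) > 1:
--         return "mixed"
--     return "unknown"
-- ===== SOURCE B (Python) =====
-- def detect_pronoun(text: str) -> str:
--     """One single-space-split pass + token-set lookups instead of nine substring scans."""
--     if not isinstance(text, str):
--         return "unknown"
--
--     words = set((" " + text.lower().strip() + " ").split(" "))
--
--     groups = [
--         ("he", {"he", "him", "his"}),
--         ("she", {"she", "her", "hers"}),
--         ("they", {"they", "them", "their", "theirs"}),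
--     ]
--     cats = [name for name, grp in groups if not words.isdisjoint(grp)]
--
--     if len(cats) == 1:
--         return cats[0]
--     return "mixed" if len(cats) > 1 else "unknown"
-- ===== Notes on version B (the rewrite author's own statement) =====
-- stated objective: alternative
-- what changed: B replaces A's nine whole-string substring scans (space-delimited substring scans) by a single single-space-split pass into a token set plus per-group isdisjoint tests, and replaces the boolean if-chain by collecting matched category names and branching on their count.
import Mathlib
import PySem

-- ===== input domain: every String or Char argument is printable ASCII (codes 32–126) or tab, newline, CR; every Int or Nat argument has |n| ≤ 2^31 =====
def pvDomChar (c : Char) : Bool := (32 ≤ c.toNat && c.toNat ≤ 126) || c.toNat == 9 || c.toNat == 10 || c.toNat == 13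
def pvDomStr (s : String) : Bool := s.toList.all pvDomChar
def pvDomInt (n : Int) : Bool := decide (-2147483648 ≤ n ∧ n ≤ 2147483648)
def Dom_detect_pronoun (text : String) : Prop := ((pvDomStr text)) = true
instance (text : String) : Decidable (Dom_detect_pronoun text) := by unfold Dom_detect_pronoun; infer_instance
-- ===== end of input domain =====

-- B replaces A's nine whole-string substring scans by one single-space-split pass into a token set
-- plus per-group disjointness tests (objective: alternative, same asymptotic cost).

-- ===== PORT A =====
-- (the 'isinstance(text, str)' guard is always true for a String argument and its branch is unreachable)
def detect_pronoun (text : String) : String :=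
  let t : List Char := ' ' :: (PySem.Chars.strip (PySem.Chars.lower text.toList) ++ [' '])
  let he_hits := [[' ','h','e',' '], [' ','h','i','m',' '], [' ','h','i','s',' ']].any
    (fun tok => PySem.Chars.isIn tok t)
  let she_hits := [[' ','s','h','e',' '], [' ','h','e','r',' '], [' ','h','e','r','s',' ']].any
    (fun tok => PySem.Chars.isIn tok t)
  let they_hits := [[' ','t','h','e','y',' '], [' ','t','h','e','m',' '], [' ','t','h','e','i','r',' '], [' ','t','h','e','i','r','s',' ']].any
    (fun tok => PySem.Chars.isIn tok t)
  if he_hits && !she_hits && !they_hits then "he"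
  else if she_hits && !he_hits && !they_hits then "she"
  else if they_hits && !he_hits && !she_hits then "they"
  else if ((if he_hits then (1:Int) else 0) + (if she_hits then 1 else 0) + (if they_hits then 1 else 0)) > 1 then "mixed"
  else "unknown"

-- ===== PORT B =====
def detect_pronoun_alt (text : String) : String :=
  let words : PySem.Set (List Char) :=
    PySem.Set.ofList (PySem.Chars.splitOn (' ' :: (PySem.Chars.strip (PySem.Chars.lower text.toList) ++ [' '])) [' '])
  let groups : List (String × List (List Char)) :=
    [("he", [['h','e'], ['h','i','m'], ['h','i','s']]),
     ("she", [['s','h','e'], ['h','e','r'], ['h','e','r','s']]),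
     ("they", [['t','h','e','y'], ['t','h','e','m'], ['t','h','e','i','r'], ['t','h','e','i','r','s']])]
  let cats : List String := (groups.filter (fun g => !(PySem.Set.isdisjoint words g.2))).map (fun g => g.1)
  if cats.length = 1 then cats.headD "unknown"
  else if 1 < cats.length then "mixed"
  else "unknown"

-- ===== PRECONDITION & SPEC =====
def Spec_detect_pronoun (text : String) (out : String) : Prop := out = detect_pronoun_alt text
instance (text : String) (out : String) : Decidable (Spec_detect_pronoun text out) := by unfold Spec_detect_pronoun; infer_instance

-- ===== CLAIM (what is proved, stated in full; the proofs are below) =====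
def Claim_equal_detect_pronoun : Prop := ∀ (text : String), Dom_detect_pronoun text → Spec_detect_pronoun text (detect_pronoun text)

-- ===== LEMMAS AND PROOFS =====

-- the last element of p ++ (' ' :: w) is in w when w is nonempty
theorem pvLastSpace (p w m : List Char) (h : p ++ (' ' :: w) = m ++ [' ']) (hw : w ≠ []) : ' ' ∈ w := by
  have h2 : (p ++ (' ' :: w)).getLast? = (m ++ [' ']).getLast? := by rw [h]
  rw [List.getLast?_append_of_ne_nil _ (by simp), List.getLast?_append_of_ne_nil _ (by simp),
    List.getLast?_cons] at h2
  cases hw2 : w.getLast? with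
  | none => exact absurd (List.getLast?_eq_none_iff.mp hw2) hw
  | some c =>
    rw [hw2] at h2; simp at h2; subst h2
    exact List.mem_of_getLast? hw2

-- proof-side model of splitting a char list on single spaces ('cur' is the token being built)
def pvTok (cur : List Char) : List Char → List (List Char)
  | [] => [cur]
  | c :: r => if c = ' ' then cur :: pvTok [] r else pvTok (cur ++ [c]) r

theorem pvTakePrefix (w : List Char) (hsp : ' ' ∉ w) :
    ∀ r : List Char, w ++ [' '] <+: r → w = r.takeWhile (· != ' ') := by
  induction w with
  | nil =>
    intro r h; cases r with
    | nil => simp at h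
    | cons c r' =>
      have : c = ' ' := by
        rcases h with ⟨t, ht⟩; simpa using congrArg (List.head? ·) ht.symm
      subst this; simp [List.takeWhile]
  | cons c w' ih =>
    intro r h; cases r with
    | nil => simp at h
    | cons d r' =>
      rcases h with ⟨t, ht⟩
      simp at ht
      obtain ⟨rfl, ht⟩ := ht
      have hc : c ≠ ' ' := fun hc => hsp (by simp [hc])
      rw [List.takeWhile_cons, if_pos (by simpa using hc)]
      rw [List.cons_eq_cons]
      refine ⟨rfl, ?_⟩
      exact ih (fun hm => hsp (List.mem_cons_of_mem _ hm)) r' ⟨t, by simpa using ht⟩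

theorem pvTakeCases (r : List Char) :
    r.takeWhile (· != ' ') ++ [' '] <+: r ∨ r.takeWhile (· != ' ') = r := by
  cases hd : r.dropWhile (· != ' ') with
  | nil => right; simpa [hd] using (List.takeWhile_append_dropWhile (p := (· != ' ')) (l := r))
  | cons c rest =>
    left
    have hc : ¬ ((· != ' ') c) = true := by
      have := List.head_dropWhile_not (p := (· != ' ')) (l := r) (by simp [hd])
      simpa [hd] using this
    have hc' : c = ' ' := by simpa using hc
    refine ⟨rest, ?_⟩
    rw [hc'] at hd
    calc r.takeWhile (· != ' ') ++ [' '] ++ rest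
        = r.takeWhile (· != ' ') ++ (' ' :: rest) := by simp
      _ = r := by rw [← hd]; exact List.takeWhile_append_dropWhile

-- which space-free nonempty words occur as tokens of pvTok
theorem pvMemTok (w : List Char) (hsp : ' ' ∉ w) :
    ∀ (s cur : List Char),
      (w ∈ pvTok cur s ↔
        w = cur ++ s.takeWhile (· != ' ') ∨ (' ' :: (w ++ [' '])) <:+: s ∨ (' ' :: w) <:+ s) := by
  intro s
  induction s with
  | nil =>
    intro cur
    simp [pvTok]
  | cons c r ih =>
    intro cur
    by_cases hc : c = ' '
    · subst hc
      rw [pvTok, if_pos rfl]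
      rw [List.mem_cons, ih []]
      constructor
      · rintro (h | h | h | h)
        · left; simp [h]
        · rcases pvTakeCases r with hp | hp
          · right; left
            exact List.infix_cons_iff.mpr (Or.inl (List.cons_prefix_cons.mpr ⟨rfl, h ▸ hp⟩))
          · right; right
            exact List.suffix_cons_iff.mpr (Or.inl (by simp [h, hp]))
        · right; left; exact List.infix_cons_iff.mpr (Or.inr h)
        · right; right; exact List.suffix_cons_iff.mpr (Or.inr h)
      · rintro (h | h | h)
        · left; simpa using h
        · rcases List.infix_cons_iff.mp h with hp | hp
          · right; left
            exact pvTakePrefix w hsp r (List.cons_prefix_cons.mp hp).2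
          · right; right; left; exact hp
        · rcases List.suffix_cons_iff.mp h with hp | hp
          · right; left
            have hwr : w = r := by simpa using hp
            rw [hwr] at hsp ⊢
            exact (List.takeWhile_eq_self_iff.mpr (fun x hx => by
              simp; exact fun h' => hsp (h' ▸ hx))).symm
          · right; right; right; exact hp
    · rw [pvTok, if_neg hc]
      rw [ih (cur ++ [c])]
      rw [List.takeWhile_cons, if_pos (by simpa using hc)]
      constructor
      · rintro (h | h | h)
        · left; simp at h ⊢; simpa using h
        · right; left; exact List.infix_cons_iff.mpr (Or.inr h)
        · right; right; exact List.suffix_cons_iff.mpr (Or.inr h)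
      · rintro (h | h | h)
        · left; simp at h ⊢; simpa using h
        · rcases List.infix_cons_iff.mp h with hp | hp
          · exact absurd (List.cons_prefix_cons.mp hp).1 (Ne.symm hc)
          · right; left; exact hp
        · rcases List.suffix_cons_iff.mp h with hp | hp
          · exact absurd (List.cons_eq_cons.mp hp).1 (Ne.symm hc)
          · right; right; exact hp

-- PySem's fuel-driven splitOn on a single-space separator computes pvTok
theorem pvGoEq : ∀ (fuel : Nat) (l cur : List Char) (acc : List (List Char)),
    l.length ≤ fuel →
    PySem.Chars.splitOn.go [' '] fuel l cur acc = acc.reverse ++ pvTok cur.reverse l := by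
  intro fuel
  induction fuel with
  | zero =>
    intro l cur acc h
    have : l = [] := by cases l <;> simp_all
    subst this
    simp [PySem.Chars.splitOn.go, pvTok]
  | succ n ih =>
    intro l cur acc h
    cases l with
    | nil => simp [PySem.Chars.splitOn.go, pvTok]
    | cons c rest =>
      rw [PySem.Chars.splitOn.go]
      by_cases hc : c = ' '
      · subst hc
        rw [if_pos (by simp)]
        simp only [List.length_cons] at h
        rw [ih _ _ _ (by simpa using Nat.le_of_succ_le_succ h)]
        simp [pvTok]
      · rw [if_neg (by simp [List.isPrefixOf]; exact fun h' => hc h'.symm)]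
        rw [ih _ _ _ (by simpa using Nat.le_of_succ_le_succ h)]
        rw [pvTok, if_neg hc]
        simp

theorem pvSplitOnEq (s : List Char) : PySem.Chars.splitOn s [' '] = pvTok [] s := by
  rw [PySem.Chars.splitOn, pvGoEq _ _ _ _ (Nat.le_succ _)]
  simp

-- a space-free nonempty word is a token of ' '::m++[' '] split on ' ' iff ' '++w++' ' is a substring
theorem pvMemSplit (m w : List Char) (hw : w ≠ []) (hsp : ' ' ∉ w) :
    (w ∈ PySem.Chars.splitOn (' ' :: (m ++ [' '])) [' ']) ↔
      PySem.Chars.isIn (' ' :: (w ++ [' '])) (' ' :: (m ++ [' '])) = true := by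
  rw [pvSplitOnEq, pvMemTok w hsp, PySem.Chars.isIn_iff_infix]
  rw [List.takeWhile_cons, if_neg (by simp)]
  constructor
  · rintro (h | h | h)
    · exact absurd (by simpa using h) hw
    · exact h
    · rcases List.suffix_cons_iff.mp h with hp | hp
      · have : w = m ++ [' '] := by simpa using hp
        exact absurd (this ▸ (List.mem_append.mpr (Or.inr (by simp)))) hsp
      · rcases hp with ⟨p, hp⟩
        exact absurd (pvLastSpace p w m hp hw) hsp
  · exact fun h => Or.inr (Or.inl h)

-- B's disjointness test, rewritten as a scan of the (small) group
theorem pvDisj (s grp : List (List Char)) :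
    (!PySem.Set.isdisjoint s grp) = grp.any (fun w => decide (w ∈ s)) := by
  simp only [PySem.Set.isdisjoint, PySem.Set.contains, Bool.not_not]
  rw [Bool.eq_iff_iff]
  simp [List.any_eq_true]
  exact ⟨fun ⟨x, hx, hm⟩ => ⟨x, hm, hx⟩, fun ⟨x, hx, hm⟩ => ⟨x, hm, hx⟩⟩

theorem pvGroup (m : List Char) (grp : List (List Char)) (h : ∀ w ∈ grp, w ≠ [] ∧ ' ' ∉ w) :
    (!PySem.Set.isdisjoint (PySem.Set.ofList (PySem.Chars.splitOn (' ' :: (m ++ [' '])) [' '])) grp)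
      = grp.any (fun w => PySem.Chars.isIn (' ' :: (w ++ [' '])) (' ' :: (m ++ [' ']))) := by
  rw [pvDisj]
  refine PySem.List.any_congr_mem (fun w hw => ?_)
  rcases h w hw with ⟨h1, h2⟩
  rw [Bool.eq_iff_iff, decide_eq_true_eq, PySem.Set.mem_ofList]
  exact pvMemSplit m w h1 h2

-- ===== VERDICT (by name: the statement is the Claim_ definition above) =====
theorem detect_pronoun_spec : Claim_equal_detect_pronoun := by
  intro text _
  unfold Spec_detect_pronoun detect_pronoun detect_pronoun_alt
  dsimp only
  simp only [List.filter_cons, List.filter_nil]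
  rw [pvGroup _ _ (by decide), pvGroup _ _ (by decide), pvGroup _ _ (by decide)]
  simp only [List.any_cons, List.any_nil, List.cons_append, List.nil_append]
  simp only [Bool.or_false]
  obtain h1 | h1 := Bool.eq_false_or_eq_true (PySem.Chars.isIn [' ','h','e',' '] (' ' :: (PySem.Chars.strip (PySem.Chars.lower text.toList) ++ [' '])) || (PySem.Chars.isIn [' ','h','i','m',' '] (' ' :: (PySem.Chars.strip (PySem.Chars.lower text.toList) ++ [' '])) || PySem.Chars.isIn [' ','h','i','s',' '] (' ' :: (PySem.Chars.strip (PySem.Chars.lower text.toList) ++ [' '])))) <;>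
  obtain h2 | h2 := Bool.eq_false_or_eq_true (PySem.Chars.isIn [' ','s','h','e',' '] (' ' :: (PySem.Chars.strip (PySem.Chars.lower text.toList) ++ [' '])) || (PySem.Chars.isIn [' ','h','e','r',' '] (' ' :: (PySem.Chars.strip (PySem.Chars.lower text.toList) ++ [' '])) || PySem.Chars.isIn [' ','h','e','r','s',' '] (' ' :: (PySem.Chars.strip (PySem.Chars.lower text.toList) ++ [' '])))) <;>
  obtain h3 | h3 := Bool.eq_false_or_eq_true (PySem.Chars.isIn [' ','t','h','e','y',' '] (' ' :: (PySem.Chars.strip (PySem.Chars.lower text.toList) ++ [' '])) || (PySem.Chars.isIn [' ','t','h','e','m',' '] (' ' :: (PySem.Chars.strip (PySem.Chars.lower text.toList) ++ [' '])) || (PySem.Chars.isIn [' ','t','h','e','i','r',' '] (' ' :: (PySem.Chars.strip (PySem.Chars.lower text.toList) ++ [' '])) || PySem.Chars.isIn [' ','t','h','e','i','r','s',' '] (' ' :: (PySem.Chars.strip (PySem.Chars.lower text.toList) ++ [' ']))))) <;>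
  simp only [h1, h2, h3] <;> decide
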